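-- pv_equiv track=rewrite | github.com/dojo-natal/dojo-natal | 2019-06-25 - nuvem de cinzas/nuvem_de_cinzas.py | nuvem_de_cinzas
-- ===== SOURCE A (Python) =====
-- def nuvem_de_cinzas(mapa):
-- 	coordenadas_cinzas = []
-- 	coordenadas_aeroporto = []
-- 	answer = -1
--
-- 	for idx_linha, linha in enumerate(mapa):
-- 		for idx_quadrado, quadrado in enumerate(linha):
-- 			if quadrado == '*':
-- 				coordenadas_cinzas.append((idx_linha, idx_quadrado))
-- 			if quadrado == 'A':
-- 				coordenadas_aeroporto.append((idx_linha, idx_quadrado))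
--
-- 	for aero in coordenadas_aeroporto:
-- 		x_aero, y_aero = aero
-- 		dias_aero  = -1
-- 		for nuvem in coordenadas_cinzas:
-- 			x_nuvem, y_nuvem = nuvem
-- 			dist = abs(x_aero-x_nuvem) + abs(y_aero-y_nuvem)
-- 			dias_aero = dist if dias_aero == -1 else min(dist, dias_aero)
-- 		answer = dias_aero if dias_aero == -1 else max(answer, dias_aero)
--
-- 	return answer
-- ===== SOURCE B (Python) =====
-- def nuvem_de_cinzas(mapa):
-- 	clouds = []
-- 	airports = []
-- 	for i, linha in enumerate(mapa):
-- 		for j, q in enumerate(linha):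
-- 			if q == '*':
-- 				clouds.append((i, j))
-- 			elif q == 'A':
-- 				airports.append((i, j))
-- 	if not clouds or not airports:
-- 		return -1
-- 	(c0x, c0y), *rest = clouds
-- 	best = [abs(x - c0x) + abs(y - c0y) for x, y in airports]
-- 	for cx, cy in rest:
-- 		best = [min(b, abs(x - cx) + abs(y - cy)) for b, (x, y) in zip(best, airports)]
-- 	return max(best)
-- ===== Notes on version B (the rewrite author's own statement) =====
-- stated objective: alternative
-- what changed: A rescans the full cloud list once per airport with a -1 sentinel accumulator; B makes one transposed pass over the clouds, maintaining a running minimum per airport in a list updated cloud by cloud, with an early return for the no-cloud/no-airport cases and plain min/max instead of sentinels.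
import Mathlib
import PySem

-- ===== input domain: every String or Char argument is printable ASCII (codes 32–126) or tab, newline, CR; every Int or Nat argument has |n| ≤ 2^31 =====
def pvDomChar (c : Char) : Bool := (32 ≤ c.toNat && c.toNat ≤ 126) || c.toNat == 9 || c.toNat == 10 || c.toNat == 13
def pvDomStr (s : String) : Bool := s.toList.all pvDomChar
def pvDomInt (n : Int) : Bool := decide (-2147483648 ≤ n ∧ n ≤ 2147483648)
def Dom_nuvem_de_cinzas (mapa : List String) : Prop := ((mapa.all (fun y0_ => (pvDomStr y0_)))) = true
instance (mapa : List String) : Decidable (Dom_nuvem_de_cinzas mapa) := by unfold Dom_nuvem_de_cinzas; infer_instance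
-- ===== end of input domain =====

-- B replaces A's per-airport rescans of the cloud list (sentinel -1 accumulator) by a single
-- transposed pass: one running-minimum per airport, updated cloud by cloud, then a plain max
-- (objective: alternative; same asymptotic cost, different loop structure and state).

-- ===== PORT A =====
def nuvem_de_cinzas (mapa : List String) : Int :=
  let coords := (PySem.List.enumerate mapa 0).foldl
    (fun (st : List (Int × Int) × List (Int × Int)) lp =>
      (PySem.List.enumerate lp.2.toList 0).foldl
        (fun st qp =>
          let st1 := if qp.2 == '*' then (st.1 ++ [(lp.1, qp.1)], st.2) else st
          if qp.2 == 'A' then (st1.1, st1.2 ++ [(lp.1, qp.1)]) else st1)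
        st)
    ([], [])
  coords.2.foldl
    (fun answer aero =>
      let dias := coords.1.foldl
        (fun dias nuvem =>
          let dist := |aero.1 - nuvem.1| + |aero.2 - nuvem.2|
          if dias == -1 then dist else min dist dias)
        (-1)
      if dias == -1 then dias else max answer dias)
    (-1)

-- ===== PORT B =====
def nuvem_de_cinzas_alt (mapa : List String) : Int :=
  let st := (PySem.List.enumerate mapa 0).foldl
    (fun (st : List (Int × Int) × List (Int × Int)) lp =>
      (PySem.List.enumerate lp.2.toList 0).foldl
        (fun st qp =>
          if qp.2 == '*' then (st.1 ++ [(lp.1, qp.1)], st.2)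
          else if qp.2 == 'A' then (st.1, st.2 ++ [(lp.1, qp.1)])
          else st)
        st)
    ([], [])
  match st.1, st.2 with
  | [], _ => -1
  | _, [] => -1
  | c0 :: rest, a0 :: tl =>
    let airports := a0 :: tl
    let best := airports.map (fun a => |a.1 - c0.1| + |a.2 - c0.2|)
    let final := rest.foldl
      (fun best c =>
        (best.zip airports).map (fun bx => min bx.1 (|bx.2.1 - c.1| + |bx.2.2 - c.2|)))
      best
    (PySem.List.max? final (fun y => y)).getD 0

-- ===== PRECONDITION & SPEC =====
def Spec_nuvem_de_cinzas (mapa : List String) (out : Int) : Prop := out = nuvem_de_cinzas_alt mapa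
instance (mapa : List String) (out : Int) : Decidable (Spec_nuvem_de_cinzas mapa out) := by unfold Spec_nuvem_de_cinzas; infer_instance

-- ===== CLAIM (what is proved, stated in full; the proofs are below) =====
def Claim_equal_nuvem_de_cinzas : Prop := ∀ (mapa : List String), Dom_nuvem_de_cinzas mapa → Spec_nuvem_de_cinzas mapa (nuvem_de_cinzas mapa)

-- ===== LEMMAS AND PROOFS =====

-- helpers used only by the proofs
def pvDist (a c : Int × Int) : Int := |a.1 - c.1| + |a.2 - c.2|

def pvMins (c0 : Int × Int) (rest : List (Int × Int)) (a : Int × Int) : Int :=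
  List.foldl (fun (m : Int) (c : Int × Int) => min m (pvDist a c)) (pvDist a c0) rest

lemma pvDist_nonneg (a c : Int × Int) : 0 ≤ pvDist a c := by
  unfold pvDist; positivity

-- A's character step (two sequential ifs) equals B's (if/elif): a char is never both '*' and 'A'.
lemma pv_step_eq (li : Int) :
    (fun (st : List (Int × Int) × List (Int × Int)) (qp : Int × Char) =>
      let st1 := if qp.2 == '*' then (st.1 ++ [(li, qp.1)], st.2) else st
      if qp.2 == 'A' then (st1.1, st1.2 ++ [(li, qp.1)]) else st1)
    = (fun (st : List (Int × Int) × List (Int × Int)) (qp : Int × Char) =>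
      if qp.2 == '*' then (st.1 ++ [(li, qp.1)], st.2)
      else if qp.2 == 'A' then (st.1, st.2 ++ [(li, qp.1)])
      else st) := by
  funext st qp
  by_cases h1 : qp.2 = '*' <;> by_cases h2 : qp.2 = 'A' <;> simp_all

lemma pv_const_neg_one (l : List (Int × Int)) (x : Int) :
    List.foldl (fun (_ : Int) (_ : Int × Int) => (-1 : Int)) x l = -1 ∨ l = [] := by
  cases l with
  | nil => right; rfl
  | cons y ys =>
    left
    induction ys generalizing x y with
    | nil => rfl
    | cons z zs ih => exact ih x z

lemma pv_minfold_nonneg (f : Int × Int → Int) (cs : List (Int × Int)) (d : Int)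
    (hf : ∀ c, 0 ≤ f c) (hd : 0 ≤ d) :
    0 ≤ List.foldl (fun (m : Int) (c : Int × Int) => min m (f c)) d cs := by
  induction cs generalizing d with
  | nil => simpa using hd
  | cons c cs ih => exact ih (min d (f c)) (le_min hd (hf c))

lemma pvMins_nonneg (c0 : Int × Int) (rest : List (Int × Int)) (a : Int × Int) :
    0 ≤ pvMins c0 rest a :=
  pv_minfold_nonneg (fun c => pvDist a c) rest (pvDist a c0)
    (fun c => pvDist_nonneg a c) (pvDist_nonneg a c0)

lemma pv_minfold_eq (f : Int × Int → Int) (cs : List (Int × Int)) (d : Int)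
    (hf : ∀ c, 0 ≤ f c) (hd : 0 ≤ d) :
    List.foldl (fun (dias : Int) (c : Int × Int) => if dias == -1 then f c else min (f c) dias) d cs
      = List.foldl (fun (m : Int) (c : Int × Int) => min m (f c)) d cs := by
  induction cs generalizing d with
  | nil => rfl
  | cons c cs ih =>
    have hne : (d == (-1 : Int)) = false := by simp; omega
    simp only [List.foldl_cons, hne, Bool.false_eq_true, if_false]
    rw [min_comm (f c) d]
    exact ih (min d (f c)) (le_min hd (hf c))

-- A's inner loop (sentinel -1) computes the per-airport minimum distance
lemma pv_inner_eq (c0 : Int × Int) (rest : List (Int × Int)) (a : Int × Int) :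
    List.foldl
      (fun (dias : Int) (nuvem : Int × Int) =>
        if dias == -1 then |a.1 - nuvem.1| + |a.2 - nuvem.2|
        else min (|a.1 - nuvem.1| + |a.2 - nuvem.2|) dias) (-1) (c0 :: rest)
    = pvMins c0 rest a := by
  have hdist : ∀ (c : Int × Int), 0 ≤ |a.1 - c.1| + |a.2 - c.2| := by
    intro c; positivity
  simp only [List.foldl_cons]
  rw [show ((-1 : Int) == -1) = true from rfl]
  simp only [if_true]
  have h := pv_minfold_eq (fun c => |a.1 - c.1| + |a.2 - c.2|) rest
    (|a.1 - c0.1| + |a.2 - c0.2|) hdist (hdist c0)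
  exact h

lemma pv_zip_map_self (g : Int × Int → Int) (aps : List (Int × Int)) :
    (aps.map g).zip aps = aps.map (fun a => (g a, a)) := by
  induction aps with
  | nil => rfl
  | cons a t ih => simp [ih]

-- B's transposed pass = map of per-airport min folds
lemma pv_transpose (aps : List (Int × Int)) (cs : List (Int × Int)) (g : Int × Int → Int) :
    List.foldl
      (fun (best : List Int) (c : Int × Int) =>
        (best.zip aps).map (fun bx => min bx.1 (pvDist bx.2 c)))
      (aps.map g) cs
      = aps.map (fun a => List.foldl (fun (m : Int) (c : Int × Int) => min m (pvDist a c)) (g a) cs) := by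
  induction cs generalizing g with
  | nil => rfl
  | cons c cs ih =>
    simp only [List.foldl_cons, pv_zip_map_self, List.map_map]
    exact ih (fun a => min (g a) (pvDist a c))

-- the whole post-scan computation agrees for any collected lists
lemma pv_core_eq (clouds airports : List (Int × Int)) :
    airports.foldl
      (fun answer aero =>
        let dias := clouds.foldl
          (fun dias nuvem =>
            let dist := |aero.1 - nuvem.1| + |aero.2 - nuvem.2|
            if dias == -1 then dist else min dist dias)
          (-1)
        if dias == -1 then dias else max answer dias)
      (-1)
    = (match clouds, airports with
      | [], _ => -1
      | _, [] => -1
      | c0 :: rest, a0 :: tl =>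
        let airports := a0 :: tl
        let best := airports.map (fun a => |a.1 - c0.1| + |a.2 - c0.2|)
        let final := rest.foldl
          (fun best c =>
            (best.zip airports).map (fun bx => min bx.1 (|bx.2.1 - c.1| + |bx.2.2 - c.2|)))
          best
        (PySem.List.max? final (fun y => y)).getD 0) := by
  cases clouds with
  | nil =>
    cases airports with
    | nil => rfl
    | cons a tl =>
      show List.foldl (fun (answer : Int) (_ : Int × Int) => if ((-1 : Int) == -1) then (-1 : Int) else answer) (-1) (a :: tl) = -1
      rw [show (List.foldl (fun (answer : Int) (_ : Int × Int) => if ((-1 : Int) == -1) then (-1 : Int) else answer) (-1) (a :: tl))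
            = List.foldl (fun (_ : Int) (_ : Int × Int) => (-1 : Int)) (-1) (a :: tl) from rfl]
      rcases pv_const_neg_one (a :: tl) (-1) with h | h
      · exact h
      · simp at h
  | cons c0 rest =>
    cases airports with
    | nil => rfl
    | cons a0 tl =>
      show List.foldl
          (fun (answer : Int) (aero : Int × Int) =>
            let dias := List.foldl
              (fun (dias : Int) (nuvem : Int × Int) =>
                if dias == -1 then |aero.1 - nuvem.1| + |aero.2 - nuvem.2|
                else min (|aero.1 - nuvem.1| + |aero.2 - nuvem.2|) dias)
              (-1) (c0 :: rest)
            if dias == -1 then dias else max answer dias)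
          (-1) (a0 :: tl)
        = (PySem.List.max? (List.foldl
            (fun (best : List Int) (c : Int × Int) =>
              (best.zip (a0 :: tl)).map (fun bx => min bx.1 (pvDist bx.2 c)))
            ((a0 :: tl).map (fun a => pvDist a c0)) rest) (fun y => y)).getD 0
      have hA : List.foldl
          (fun (answer : Int) (aero : Int × Int) =>
            let dias := List.foldl
              (fun (dias : Int) (nuvem : Int × Int) =>
                if dias == -1 then |aero.1 - nuvem.1| + |aero.2 - nuvem.2|
                else min (|aero.1 - nuvem.1| + |aero.2 - nuvem.2|) dias)
              (-1) (c0 :: rest)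
            if dias == -1 then dias else max answer dias)
          (-1) (a0 :: tl)
          = List.foldl (fun (answer : Int) (aero : Int × Int) => max answer (pvMins c0 rest aero)) (-1) (a0 :: tl) := by
        apply PySem.List.foldl_congr_mem
        intro acc x _
        rw [pv_inner_eq c0 rest x]
        have hne : (pvMins c0 rest x == (-1 : Int)) = false := by
          have := pvMins_nonneg c0 rest x; simp; omega
        simp [hne]
      have hB : List.foldl
          (fun (best : List Int) (c : Int × Int) =>
            (best.zip (a0 :: tl)).map (fun bx => min bx.1 (pvDist bx.2 c)))
          ((a0 :: tl).map (fun a => pvDist a c0)) rest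
          = (a0 :: tl).map (fun a => pvMins c0 rest a) :=
        pv_transpose (a0 :: tl) rest (fun a => pvDist a c0)
      rw [hA, hB, List.map_cons, PySem.List.max?_id_cons]
      simp only [Option.getD_some, List.foldl_cons]
      rw [max_eq_right (by have := pvMins_nonneg c0 rest a0; omega : (-1 : Int) ≤ pvMins c0 rest a0)]
      rw [List.foldl_map]

-- ===== VERDICT (by name: the statement is the Claim_ definition above) =====
theorem nuvem_de_cinzas_spec : Claim_equal_nuvem_de_cinzas := by
  intro mapa _
  show nuvem_de_cinzas mapa = nuvem_de_cinzas_alt mapa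
  unfold nuvem_de_cinzas nuvem_de_cinzas_alt
  simp only [pv_step_eq]
  exact pv_core_eq _ _
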